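-- pv_equiv track=rewrite | github.com/minsoehtut306/AI-and-Machine-Learning | Artificial Intelligence/MarkovNgram_TextModels.py | build_bigram
-- ===== SOURCE A (Python) =====
-- from typing import Dict, Iterable, List, Optional, Sequence, Tuple
--
-- Model = Dict[Tuple[str, ...], Dict[str, int]]
--
-- def build_bigram(sequence: Sequence[str]) -> Model:
--     """
--     Build a bigram model:
--       {(w_{i-1},): {w_i: count, ...}, ...}
--     """
--     model: Model = {}
--     for i in range(len(sequence) - 1):
--         ctx = (sequence[i],)
--         nxt = sequence[i + 1]
--         bucket = model.setdefault(ctx, {})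
--         bucket[nxt] = bucket.get(nxt, 0) + 1
--     return model
-- ===== SOURCE B (Python) =====
-- def build_bigram(sequence):
--     """Two-pass build: flat (prev, nxt) pair-frequency table, then reshape into the nested model."""
--     pairs = {}
--     for p in zip(sequence, sequence[1:]):
--         pairs[p] = pairs.get(p, 0) + 1
--     model = {}
--     for (prev, nxt), c in pairs.items():
--         model.setdefault((prev,), {})[nxt] = c
--     return model
-- ===== Notes on version B (the rewrite author's own statement) =====
-- stated objective: alternative
-- what changed: A builds the nested model in one fused index loop that setdefaults a bucket and increments per occurrence; B first tallies a flat (prev, next) pair-frequency table in one zip pass and then reshapes those counted pairs into the nested model in a separate second pass.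
import Mathlib
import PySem

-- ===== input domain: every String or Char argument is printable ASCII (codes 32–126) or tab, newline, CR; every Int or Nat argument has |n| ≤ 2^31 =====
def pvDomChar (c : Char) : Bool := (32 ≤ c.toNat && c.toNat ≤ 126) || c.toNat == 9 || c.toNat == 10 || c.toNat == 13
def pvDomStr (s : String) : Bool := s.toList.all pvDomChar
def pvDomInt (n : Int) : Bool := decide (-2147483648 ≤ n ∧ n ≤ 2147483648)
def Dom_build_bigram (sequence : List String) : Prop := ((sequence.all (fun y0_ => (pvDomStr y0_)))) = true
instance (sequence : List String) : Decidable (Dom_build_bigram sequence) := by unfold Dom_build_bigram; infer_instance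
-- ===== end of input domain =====

-- B builds a flat (prev, next) pair-frequency table in one pass and then reshapes it into
-- the nested model in a second pass, instead of A's single fused nested-update loop (objective: alternative).


-- ===== PORT A =====
-- Literal port of A: for i in range(len(sequence)-1): bucket = model.setdefault((sequence[i],), {});
-- bucket[sequence[i+1]] = bucket.get(sequence[i+1], 0) + 1
def build_bigram (sequence : List String) : List (List String × List (String × Int)) :=
  let model : PySem.Dict (List String) (PySem.Dict String Int) :=
    (PySem.List.pyRange 0 (PySem.List.len sequence - 1)).foldl
      (fun model i =>
        let ctx : List String := [PySem.List.pyGetD sequence i ""]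
        let nxt := PySem.List.pyGetD sequence (i + 1) ""
        let model' := model.setdefault ctx PySem.Dict.empty
        let bucket := model'.getD ctx PySem.Dict.empty
        model'.insert ctx (bucket.insert nxt (bucket.getD nxt 0 + 1)))
      PySem.Dict.empty
  model.items.map (fun p => (p.1, p.2.items))

-- ===== PORT B =====
-- Literal port of Source B: pairs[p] = pairs.get(p, 0) + 1 over zip(sequence, sequence[1:]),
-- then model.setdefault((prev,), {})[nxt] = c over pairs.items().
def build_bigram_alt (sequence : List String) : List (List String × List (String × Int)) :=
  let pairs : PySem.Dict (String × String) Int :=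
    (sequence.zip (PySem.List.slice sequence (some 1))).foldl
      (fun d p => d.insert p (d.getD p 0 + 1)) PySem.Dict.empty
  let model : PySem.Dict (List String) (PySem.Dict String Int) :=
    pairs.items.foldl
      (fun m pc =>
        let m' := m.setdefault [pc.1.1] PySem.Dict.empty
        m'.insert [pc.1.1] ((m'.getD [pc.1.1] PySem.Dict.empty).insert pc.1.2 pc.2))
      PySem.Dict.empty
  model.items.map (fun p => (p.1, p.2.items))

-- ===== PRECONDITION & SPEC =====
def Spec_build_bigram (sequence : List String) (out : List (List String × List (String × Int))) : Prop := out = build_bigram_alt sequence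
instance (sequence : List String) (out : List (List String × List (String × Int))) : Decidable (Spec_build_bigram sequence out) := by unfold Spec_build_bigram; infer_instance

-- ===== CLAIM (what is proved, stated in full; the proofs are below) =====
def Claim_equal_build_bigram : Prop := ∀ (sequence : List String), Dom_build_bigram sequence → Spec_build_bigram sequence (build_bigram sequence)

-- ===== LEMMAS AND PROOFS =====

-- The accumulator update of A's fused loop, written over the (prev, next) pair it touches.
def stepA (md : PySem.Dict (List String) (PySem.Dict String Int)) (p : String × String) :
    PySem.Dict (List String) (PySem.Dict String Int) :=
  md.insert [p.1]
    (((md.getD [p.1] PySem.Dict.empty)).insert p.2 ((md.getD [p.1] PySem.Dict.empty).getD p.2 0 + 1))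

-- The accumulator update of B's reshaping loop.
def stepB (m : PySem.Dict (List String) (PySem.Dict String Int)) (pc : (String × String) × Int) :
    PySem.Dict (List String) (PySem.Dict String Int) :=
  m.insert [pc.1.1] ((m.getD [pc.1.1] PySem.Dict.empty).insert pc.1.2 pc.2)

-- setdefault k v followed by an insert at k is a plain insert at k.
theorem setdefault_insert {κ ν : Type} [BEq κ] [LawfulBEq κ] (d : PySem.Dict κ ν) (k : κ) (v w : ν) :
    (d.setdefault k v).insert k w = d.insert k w := by
  by_cases h : d.contains k
  · rw [PySem.Dict.setdefault_of_contains d v h]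
  · rw [PySem.Dict.setdefault_of_not_contains d v (by simpa using h),
      PySem.Dict.insert_insert_self]

theorem getD_setdefault_self {κ ν : Type} [BEq κ] [LawfulBEq κ] (d : PySem.Dict κ ν) (k : κ) (v : ν) :
    (d.setdefault k v).getD k v = d.getD k v := by
  rw [PySem.Dict.getD_eq_get?_getD, PySem.Dict.get?_setdefault_self, PySem.Dict.getD_eq_get?_getD]
  cases d.get? k <;> rfl

theorem ofList_append_singleton {α : Type} [BEq α] (xs : List α) (x : α) :
    PySem.Set.ofList (xs ++ [x]) = PySem.Set.add (PySem.Set.ofList xs) x := by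
  rw [PySem.Set.ofList_append]; rfl

theorem add_of_mem {α : Type} [BEq α] [LawfulBEq α] (s : PySem.Set α) (x : α) (h : x ∈ s) :
    PySem.Set.add s x = s := by
  simp [PySem.Set.add, PySem.Set.contains, h]

theorem add_of_not_mem {α : Type} [BEq α] [LawfulBEq α] (s : PySem.Set α) (x : α) (h : x ∉ s) :
    PySem.Set.add s x = s ++ [x] := by
  simp [PySem.Set.add, PySem.Set.contains, h]

theorem foldl_range_pairs {α β : Type} (xs : List α) (d : α) (f : β → α → α → β) (init : β) :
    (PySem.List.pyRange 0 (PySem.List.len xs - 1)).foldl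
      (fun acc i => f acc (PySem.List.pyGetD xs i d) (PySem.List.pyGetD xs (i + 1) d)) init =
      (xs.zip (xs.drop 1)).foldl (fun acc p => f acc p.1 p.2) init := by
  have hlen : (xs.zip (xs.drop 1)).length = xs.length - 1 := by
    simp [List.length_zip]
  have hrange : PySem.List.pyRange 0 (PySem.List.len xs - 1) =
      PySem.List.pyRange 0 (PySem.List.len (xs.zip (xs.drop 1))) := by
    cases xs with
    | nil => rfl
    | cons y ys =>
      congr 1
      simp [PySem.List.len]
  rw [hrange]
  have h := PySem.List.foldl_pyRange_pyGetD (xs.zip (xs.drop 1)) (d, d)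
    (fun acc p => f acc p.1 p.2) init (a := 0) le_rfl
  simp only [Int.toNat_zero, List.drop_zero] at h
  rw [← h]
  apply PySem.List.foldl_congr_mem
  intro acc i hi
  obtain ⟨h0, h1⟩ := (PySem.List.mem_pyRange_one).mp hi
  have h1' : i < ((xs.zip (xs.drop 1)).length : Int) := by
    simpa [PySem.List.len] using h1
  have hx1 : i < (xs.length : Int) := by omega
  have hx2 : i + 1 < (xs.length : Int) := by
    have : ((xs.zip (xs.drop 1)).length : Int) ≤ (xs.length : Int) - 1 := by
      rw [hlen]; omega
    omega
  rw [PySem.List.pyGetD_eq_getElem xs d h0 hx1,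
    PySem.List.pyGetD_eq_getElem xs d (by omega) hx2,
    PySem.List.pyGetD_eq_getElem (xs.zip (xs.drop 1)) (d, d) h0 h1']
  have hi1 : (i + 1).toNat = i.toNat + 1 := by omega
  simp [List.getElem_zip, hi1]

-- first-occurrence dedup commutes with filter
theorem ofList_filter {α : Type} [BEq α] [LawfulBEq α] (p : α → Bool) (xs : List α) :
    PySem.Set.ofList (xs.filter p) = (PySem.Set.ofList xs).filter p := by
  induction xs using List.reverseRecOn with
  | nil => rfl
  | append_singleton xs x ih =>
    rw [List.filter_append, ofList_append_singleton]
    by_cases hm : x ∈ xs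
    · rw [add_of_mem _ _ (by simp [PySem.Set.mem_ofList, hm])]
      by_cases hx : p x
      · have : List.filter p [x] = [x] := by simp [hx]
        rw [this, ofList_append_singleton, ih,
          add_of_mem _ _ (by simp [List.mem_filter, PySem.Set.mem_ofList, hm, hx])]
      · have : List.filter p [x] = [] := by simp [hx]
        rw [this, List.append_nil, ih]
    · rw [add_of_not_mem _ _ (by simp [PySem.Set.mem_ofList, hm]), List.filter_append]
      by_cases hx : p x
      · have : List.filter p [x] = [x] := by simp [hx]
        rw [this, ofList_append_singleton, ih,
          add_of_not_mem _ _ (by simp [List.mem_filter, PySem.Set.mem_ofList, hm])]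
      · have : List.filter p [x] = [] := by simp [hx]
        rw [this, List.append_nil, List.append_nil, ih]

-- first-occurrence dedup commutes with an injective-on-the-list map
theorem ofList_map_inj {α β : Type} [BEq α] [LawfulBEq α] [BEq β] [LawfulBEq β]
    (f : α → β) (xs : List α) (hinj : ∀ a ∈ xs, ∀ b ∈ xs, f a = f b → a = b) :
    PySem.Set.ofList (xs.map f) = (PySem.Set.ofList xs).map f := by
  induction xs using List.reverseRecOn with
  | nil => rfl
  | append_singleton xs x ih =>
    have hinj' : ∀ a ∈ xs, ∀ b ∈ xs, f a = f b → a = b := fun a ha b hb =>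
      hinj a (by simp [ha]) b (by simp [hb])
    have hmap : List.map f [x] = [f x] := by simp
    rw [List.map_append, hmap, ofList_append_singleton, ofList_append_singleton, ih hinj']
    by_cases hm : x ∈ xs
    · have h1 : f x ∈ (PySem.Set.ofList xs).map f := by
        simp only [List.mem_map]
        exact ⟨x, by simp [PySem.Set.mem_ofList, hm], rfl⟩
      rw [add_of_mem _ _ h1,
        add_of_mem (PySem.Set.ofList xs) x (by simp [PySem.Set.mem_ofList, hm])]
    · have h1 : f x ∉ (PySem.Set.ofList xs).map f := by
        simp only [List.mem_map, PySem.Set.mem_ofList]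
        rintro ⟨a, ha, hfa⟩
        exact hm (hinj a (by simp [ha]) x (by simp) hfa ▸ ha)
      rw [add_of_not_mem _ _ h1,
        add_of_not_mem (PySem.Set.ofList xs) x (by simp [PySem.Set.mem_ofList, hm]),
        List.map_append, hmap]

-- dedup of a map over a dedup is dedup of the map
theorem ofList_map_ofList {α β : Type} [BEq α] [LawfulBEq α] [BEq β] [LawfulBEq β]
    (f : α → β) (xs : List α) :
    PySem.Set.ofList ((PySem.Set.ofList xs).map f) = PySem.Set.ofList (xs.map f) := by
  induction xs using List.reverseRecOn with
  | nil => rfl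
  | append_singleton xs x ih =>
    have hmap : List.map f [x] = [f x] := by simp
    rw [ofList_append_singleton, List.map_append, hmap, ofList_append_singleton]
    by_cases hm : x ∈ xs
    · rw [add_of_mem _ _ (by simp [PySem.Set.mem_ofList, hm]),
        add_of_mem _ _ ?_, ih]
      simp only [PySem.Set.mem_ofList, List.mem_map]
      exact ⟨x, hm, rfl⟩
    · rw [add_of_not_mem _ _ (by simp [PySem.Set.mem_ofList, hm]), List.map_append, hmap,
        ofList_append_singleton, ih]

-- A's index loop is the stepA fold over the list of adjacent pairs.
theorem build_bigram_eq (sequence : List String) :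
    build_bigram sequence =
      (((sequence.zip (sequence.drop 1)).foldl stepA PySem.Dict.empty).items.map
        (fun p => (p.1, p.2.items))) := by
  unfold build_bigram
  have hbody : (fun (model : PySem.Dict (List String) (PySem.Dict String Int)) (i : Int) =>
        let ctx : List String := [PySem.List.pyGetD sequence i ""]
        let nxt := PySem.List.pyGetD sequence (i + 1) ""
        let model' := model.setdefault ctx PySem.Dict.empty
        let bucket := model'.getD ctx PySem.Dict.empty
        model'.insert ctx (bucket.insert nxt (bucket.getD nxt 0 + 1)))
      = (fun model i => stepA model (PySem.List.pyGetD sequence i "", PySem.List.pyGetD sequence (i + 1) "")) := by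
    funext md i
    simp only []
    rw [setdefault_insert, getD_setdefault_self]
    rfl
  rw [hbody]
  exact congrArg (fun m : PySem.Dict (List String) (PySem.Dict String Int) =>
      m.items.map (fun p => (p.1, p.2.items)))
    (foldl_range_pairs sequence "" (fun acc a b => stepA acc (a, b)) PySem.Dict.empty)

-- B's two passes, with the pair dict resolved to Counter items.
theorem build_bigram_alt_eq (sequence : List String) :
    build_bigram_alt sequence =
      ((((PySem.Set.ofList (sequence.zip (sequence.drop 1))).map
          (fun k => (k, ((sequence.zip (sequence.drop 1)).count k : Int)))).foldl stepB
          PySem.Dict.empty).items.map (fun p => (p.1, p.2.items))) := by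
  have hbody : (fun (m : PySem.Dict (List String) (PySem.Dict String Int))
        (pc : (String × String) × Int) =>
        let m' := m.setdefault [pc.1.1] PySem.Dict.empty
        m'.insert [pc.1.1] ((m'.getD [pc.1.1] PySem.Dict.empty).insert pc.1.2 pc.2)) = stepB := by
    funext m pc
    simp only []
    rw [setdefault_insert, getD_setdefault_self]
    rfl
  have hslice : PySem.List.slice sequence (some 1) = sequence.drop 1 :=
    PySem.List.slice_from sequence (by norm_num)
  unfold build_bigram_alt
  rw [hslice, PySem.Dict.foldl_insert_getD_add_one_eq_counter]
  show ((PySem.Dict.counter (sequence.zip (sequence.drop 1))).items.foldl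
      (fun m pc =>
        let m' := m.setdefault [pc.1.1] PySem.Dict.empty
        m'.insert [pc.1.1] ((m'.getD [pc.1.1] PySem.Dict.empty).insert pc.1.2 pc.2))
      PySem.Dict.empty).items.map (fun p => (p.1, p.2.items)) = _
  rw [PySem.Dict.items_counter, hbody]

-- the bucket the stepA fold leaves at key c
theorem bucketA (ps : List (String × String)) (md : PySem.Dict (List String) (PySem.Dict String Int))
    (c : List String) :
    (ps.foldl stepA md).getD c PySem.Dict.empty =
      ((ps.filter (fun p => [p.1] == c)).map (·.2)).foldl
        (fun d b => d.insert b (d.getD b 0 + 1)) (md.getD c PySem.Dict.empty) := by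
  induction ps generalizing md with
  | nil => rfl
  | cons p ps ih =>
    simp only [List.foldl_cons, List.filter_cons]
    rw [ih]
    by_cases h : [p.1] = c
    · simp [h, stepA]
    · have hb : ([p.1] == c) = false := by simpa using h
      simp only [hb, Bool.false_eq_true, if_false]
      have : (stepA md p).getD c PySem.Dict.empty = md.getD c PySem.Dict.empty := by
        simp [stepA, PySem.Dict.getD_insert, Ne.symm h]
      rw [this]

-- the bucket the stepB fold leaves at key c
theorem bucketB (L : List ((String × String) × Int))
    (m : PySem.Dict (List String) (PySem.Dict String Int)) (c : List String) :
    (L.foldl stepB m).getD c PySem.Dict.empty =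
      (L.filter (fun pc => [pc.1.1] == c)).foldl
        (fun d pc => d.insert pc.1.2 pc.2) (m.getD c PySem.Dict.empty) := by
  induction L generalizing m with
  | nil => rfl
  | cons pc L ih =>
    simp only [List.foldl_cons, List.filter_cons]
    rw [ih]
    by_cases h : [pc.1.1] = c
    · simp [h, stepB]
    · have hb : ([pc.1.1] == c) = false := by simpa using h
      simp only [hb, Bool.false_eq_true, if_false]
      have : (stepB m pc).getD c PySem.Dict.empty = m.getD c PySem.Dict.empty := by
        simp [stepB, PySem.Dict.getD_insert, Ne.symm h]
      rw [this]

-- the two nested models agree bucket-by-bucket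
theorem buckets_agree (ps : List (String × String)) (c : List String) :
    (ps.foldl stepA (PySem.Dict.empty : PySem.Dict (List String) (PySem.Dict String Int))).getD c PySem.Dict.empty =
      (((PySem.Set.ofList ps).map (fun k => (k, (ps.count k : Int)))).foldl stepB
        PySem.Dict.empty).getD c PySem.Dict.empty := by
  rw [bucketA, bucketB, PySem.Dict.getD_empty]
  rw [PySem.Dict.foldl_insert_getD_add_one_eq_counter]
  rw [List.filter_map]
  have hfun : ((fun pc : (String × String) × Int => [pc.1.1] == c) ∘
      (fun k : String × String => (k, (ps.count k : Int)))) = (fun k : String × String => [k.1] == c) := rfl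
  rw [hfun]
  have hinj : ∀ x ∈ (PySem.Set.ofList ps).filter (fun k => [k.1] == c),
      ∀ y ∈ (PySem.Set.ofList ps).filter (fun k => [k.1] == c), x.2 = y.2 → x = y := by
    intro x hx y hy hxy
    have hx1 : [x.1] = c := by simpa using List.of_mem_filter hx
    have hy1 : [y.1] = c := by simpa using List.of_mem_filter hy
    have h1 : x.1 = y.1 := by
      have := hx1.trans hy1.symm
      simpa using this
    exact Prod.ext h1 hxy
  apply PySem.Dict.ext
  rw [PySem.Dict.items_counter]
  rw [PySem.Dict.items_foldl_insert_fresh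
      (((PySem.Set.ofList ps).filter (fun k => [k.1] == c)).map (fun k => (k, (ps.count k : Int))))
      (fun a => a.1.2) (fun a => a.2) PySem.Dict.empty (fun a _ => PySem.Dict.contains_empty _) ?nodup]
  case nodup =>
    rw [List.map_map]
    show (((PySem.Set.ofList ps).filter (fun k => [k.1] == c)).map (fun k => k.2)).Nodup
    exact List.Nodup.map_on (fun x hx y hy => hinj x hx y hy)
      ((PySem.Set.nodup_ofList ps).filter _)
  -- item lists are equal
  have hset : PySem.Set.ofList ((ps.filter (fun p => [p.1] == c)).map (fun x => x.2)) =
      ((PySem.Set.ofList ps).filter (fun k => [k.1] == c)).map (fun x => x.2) := by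
    rw [ofList_map_inj _ _ ?inj, ofList_filter]
    case inj =>
      intro x hx y hy hxy
      have hx1 : [x.1] = c := by simpa using (List.mem_filter.mp hx).2
      have hy1 : [y.1] = c := by simpa using (List.mem_filter.mp hy).2
      have h1 : x.1 = y.1 := by
        have := hx1.trans hy1.symm
        simpa using this
      exact Prod.ext h1 hxy
  rw [hset, List.map_map, List.map_map]
  have hempty : (PySem.Dict.empty : PySem.Dict String Int).items = [] := rfl
  rw [hempty, List.nil_append]
  apply List.map_congr_left
  intro k hk
  have hk1 : [k.1] = c := by simpa using (List.mem_filter.mp hk).2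
  simp only [Function.comp]
  congr 1
  -- count k.2 in the projected filtered list = count k in ps
  rw [List.count_eq_countP, List.count_eq_countP, List.countP_map, List.countP_filter]
  congr 1
  apply List.countP_congr
  intro p _
  show (((p.2 == k.2) && ([p.1] == c)) = true) ↔ ((p == k) = true)
  constructor
  · intro h
    have h2 : p.2 = k.2 := by simpa using (Bool.and_eq_true_iff.mp h).1
    have h1 : p.1 = k.1 := by
      have := (Bool.and_eq_true_iff.mp h).2
      have hpc : [p.1] = c := by simpa using this
      have := hpc.trans hk1.symm
      simpa using this
    simp [Prod.ext_iff, h1, h2]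
  · intro h
    have hpk : p = k := by simpa using h
    subst hpk
    simp [hk1]

theorem models_eq (ps : List (String × String)) :
    ps.foldl stepA (PySem.Dict.empty : PySem.Dict (List String) (PySem.Dict String Int)) =
      ((PySem.Set.ofList ps).map (fun k => (k, (ps.count k : Int)))).foldl stepB PySem.Dict.empty := by
  have hstepA : stepA = fun md p => md.insert [p.1]
      ((md.getD [p.1] PySem.Dict.empty).insert p.2
        ((md.getD [p.1] PySem.Dict.empty).getD p.2 0 + 1)) := rfl
  have hstepB : stepB = fun m pc =>
      m.insert [pc.1.1] ((m.getD [pc.1.1] PySem.Dict.empty).insert pc.1.2 pc.2) := rfl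
  have hupd : ∀ l : List (List String), PySem.Set.update ([] : PySem.Set (List String)) l =
      PySem.Set.ofList l := fun l => (PySem.Set.ofList_eq_foldl l).symm
  have hkeysA : (ps.foldl stepA PySem.Dict.empty).keys =
      PySem.Set.ofList (ps.map fun p => [p.1]) := by
    rw [hstepA, PySem.Dict.keys_foldl_insert_key, PySem.Dict.keys_empty, hupd]
  have hkeysB : ((((PySem.Set.ofList ps).map (fun k => (k, (ps.count k : Int)))).foldl stepB
        PySem.Dict.empty)).keys = PySem.Set.ofList (ps.map fun p => [p.1]) := by
    rw [hstepB, PySem.Dict.keys_foldl_insert_key, PySem.Dict.keys_empty, hupd, List.map_map]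
    have : ((fun pc : (String × String) × Int => [pc.1.1]) ∘
        (fun k : String × String => (k, (ps.count k : Int)))) = (fun k : String × String => [k.1]) := rfl
    rw [this, ofList_map_ofList]
  have hndA : (ps.foldl stepA PySem.Dict.empty).keys.Nodup := by
    rw [hstepA]
    exact PySem.Dict.nodup_keys_foldl_insert_key _ _ _ _ (by rw [PySem.Dict.keys_empty]; exact List.nodup_nil)
  have hndB : ((((PySem.Set.ofList ps).map (fun k => (k, (ps.count k : Int)))).foldl stepB
        PySem.Dict.empty)).keys.Nodup := by
    rw [hstepB]
    exact PySem.Dict.nodup_keys_foldl_insert_key _ _ _ _ (by rw [PySem.Dict.keys_empty]; exact List.nodup_nil)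
  apply PySem.Dict.ext
  rw [PySem.Dict.items_eq_map_keys _ hndA PySem.Dict.empty,
    PySem.Dict.items_eq_map_keys _ hndB PySem.Dict.empty, hkeysA, hkeysB]
  exact List.map_congr_left (fun c _ => by rw [buckets_agree])

-- ===== VERDICT (by name: the statement is the Claim_ definition above) =====
theorem build_bigram_spec : Claim_equal_build_bigram := by
  intro sequence _
  show build_bigram sequence = build_bigram_alt sequence
  rw [build_bigram_eq, build_bigram_alt_eq, models_eq]
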